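-- pv_equiv track=rewrite | github.com/pypi-data/pypi-mirror-403 | packages/logsage/logsage-0.1.5-py3-none-any.whl/logsage/auto_resume_policy/utils.py | count_intervals_with_pattern
-- ===== SOURCE A (Python) =====
-- import bisect
--
-- def count_intervals_with_pattern(main_indices: list, patterns_dict: dict) -> dict:
--     """Count intervals,
--
--     Args:
--         main_indices: [list_of_indices]
--         patterns_dict: dict
--
--     Returns:
--         results: dict
--     """
--     # 1. Sort the main list to ensure intervals are sequential
--     main_indices.sort()
--
--     # Dictionary to store final counts for each pattern
--     results = dict.fromkeys(patterns_dict, 0)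
--
--     # 2. Iterate through sequential pairs (intervals) in the main list
--     # If list is [10, 50, 100], loops over (10, 50) then (50, 100)
--     for i in range(len(main_indices) - 1):
--         start = main_indices[i]
--         end = main_indices[i + 1]
--
--         # 3. Check each pattern against this current interval
--         for name, pattern_indices in patterns_dict.items():
--             # Ensure pattern list is sorted for binary search to work
--             # (If your data is already sorted, you can remove this sort to save time)
--             pattern_indices.sort()
--
--             # Find the first index in pattern that is > start
--             left_idx = bisect.bisect_right(pattern_indices, start)
--
--             # Find the first index in pattern that is >= end
--             right_idx = bisect.bisect_left(pattern_indices, end)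
--
--             # If left_idx < right_idx, it means there is at least one number
--             # in the pattern strictly between start and end.
--             if left_idx < right_idx:
--                 results[name] += 1
--
--     return results
-- ===== SOURCE B (Python) =====
-- def count_intervals_with_pattern(main_indices: list, patterns_dict: dict) -> dict:
--     """Count intervals containing a pattern index, via one two-pointer merge per pattern."""
--     main_indices.sort()
--     results = dict.fromkeys(patterns_dict, 0)
--     if len(main_indices) >= 2:
--         for name, pattern_indices in patterns_dict.items():
--             pattern_indices.sort()
--             j = 0
--             n = len(pattern_indices)
--             count = 0
--             for i in range(len(main_indices) - 1):
--                 start = main_indices[i]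
--                 end = main_indices[i + 1]
--                 while j < n and pattern_indices[j] <= start:
--                     j += 1
--                 if j < n and pattern_indices[j] < end:
--                     count += 1
--             results[name] += count
--     return results
-- ===== Notes on version B (the rewrite author's own statement) =====
-- stated objective: faster
-- what changed: Instead of re-sorting every pattern list and running two binary searches for every (interval, pattern) pair, B sorts each pattern list once and counts all intervals for that pattern in a single forward two-pointer merge over the sorted main indices.
import Mathlib
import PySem

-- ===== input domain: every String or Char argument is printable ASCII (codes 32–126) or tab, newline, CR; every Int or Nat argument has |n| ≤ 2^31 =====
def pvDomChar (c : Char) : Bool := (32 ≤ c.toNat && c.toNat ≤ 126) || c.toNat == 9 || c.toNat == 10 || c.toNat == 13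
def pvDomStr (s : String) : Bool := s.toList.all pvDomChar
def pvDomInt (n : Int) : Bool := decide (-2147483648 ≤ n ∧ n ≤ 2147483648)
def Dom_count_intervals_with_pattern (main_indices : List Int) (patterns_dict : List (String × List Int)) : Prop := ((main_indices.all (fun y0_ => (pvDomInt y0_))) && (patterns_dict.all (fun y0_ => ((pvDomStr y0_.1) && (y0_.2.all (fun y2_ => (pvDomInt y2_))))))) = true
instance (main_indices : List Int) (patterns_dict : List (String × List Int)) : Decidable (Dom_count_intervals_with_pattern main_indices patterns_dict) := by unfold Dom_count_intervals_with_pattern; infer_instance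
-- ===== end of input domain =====

-- B replaces A's per-(interval,pattern) re-sort + two binary searches by one sort and a single
-- two-pointer merge per pattern (measured faster).  Both A and B sort main_indices in place and sort
-- each pattern list in place iff len(main_indices) >= 2; the theorems below are about the RETURN value.

-- ===== PORT A =====
def count_intervals_with_pattern (main_indices : List Int) (patterns_dict : List (String × List Int)) : List (String × Int) :=
  -- main_indices.sort()
  let ms := PySem.List.sorted main_indices (fun x => x)
  -- results = dict.fromkeys(patterns_dict, 0)
  let results : PySem.Dict String Int :=
    patterns_dict.foldl (fun d kv => d.insert kv.1 0) PySem.Dict.empty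
  -- for i in range(len(main_indices) - 1): …
  let results :=
    (List.range (ms.length - 1)).foldl (fun r i =>
      let start := ms.getD i 0          -- i from range(len-1): always in range
      let stop := ms.getD (i + 1) 0
      -- for name, pattern_indices in patterns_dict.items(): …
      patterns_dict.foldl (fun r kv =>
        let ps := PySem.List.sorted kv.2 (fun x => x)   -- pattern_indices.sort()
        let leftIdx := PySem.List.bisectRight ps start
        let rightIdx := PySem.List.bisectLeft ps stop
        -- results[name] += 1 : the key is always present (dict.fromkeys over the same dict)
        if leftIdx < rightIdx then r.modify kv.1 0 (· + 1) else r) r) results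
  results.items

-- ===== PORT B =====
-- while j < n and pattern_indices[j] <= start: j += 1
def cwpAdvance (ps : List Int) (s : Int) (j : Nat) : Nat :=
  if h : j < ps.length then
    if ps.getD j 0 ≤ s then cwpAdvance ps s (j + 1) else j
  else j
termination_by ps.length - j

def count_intervals_with_pattern_alt (main_indices : List Int) (patterns_dict : List (String × List Int)) : List (String × Int) :=
  let ms := PySem.List.sorted main_indices (fun x => x)
  let results : PySem.Dict String Int :=
    patterns_dict.foldl (fun d kv => d.insert kv.1 0) PySem.Dict.empty
  if 2 ≤ ms.length then
    (patterns_dict.foldl (fun r kv =>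
      let ps := PySem.List.sorted kv.2 (fun x => x)   -- pattern_indices.sort()
      -- j = 0; count = 0; for i in range(len(main_indices) - 1): …
      let jc := (List.range (ms.length - 1)).foldl (fun (jc : Nat × Int) i =>
          let start := ms.getD i 0
          let stop := ms.getD (i + 1) 0
          let j := cwpAdvance ps start jc.1
          (j, if j < ps.length ∧ ps.getD j 0 < stop then jc.2 + 1 else jc.2)) (0, 0)
      -- results[name] += count
      r.modify kv.1 0 (· + jc.2)) results).items
  else results.items

-- ===== PRECONDITION & SPEC =====
def Spec_count_intervals_with_pattern (main_indices : List Int) (patterns_dict : List (String × List Int)) (out : List (String × Int)) : Prop := out = count_intervals_with_pattern_alt main_indices patterns_dict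
instance (main_indices : List Int) (patterns_dict : List (String × List Int)) (out : List (String × Int)) : Decidable (Spec_count_intervals_with_pattern main_indices patterns_dict out) := by unfold Spec_count_intervals_with_pattern; infer_instance

-- ===== CLAIM (what is proved, stated in full; the proofs are below) =====
def Claim_equal_count_intervals_with_pattern : Prop := ∀ (main_indices : List Int) (patterns_dict : List (String × List Int)), Dom_count_intervals_with_pattern main_indices patterns_dict → Spec_count_intervals_with_pattern main_indices patterns_dict (count_intervals_with_pattern main_indices patterns_dict)

-- ===== LEMMAS AND PROOFS =====

-- `cwpAdvance` started at or left of bisectRight lands exactly on bisectRight (pattern sorted).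
lemma cwpAdvance_eq_bisectRight (ps : List Int) (hps : ps.Pairwise (· ≤ ·)) (s : Int) :
    ∀ j, j ≤ PySem.List.bisectRight ps s → cwpAdvance ps s j = PySem.List.bisectRight ps s := by
  obtain ⟨hle, hlt, hgt⟩ := PySem.List.bisectRight_spec ps s hps
  have key : ∀ m j, ps.length - j ≤ m → j ≤ PySem.List.bisectRight ps s →
      cwpAdvance ps s j = PySem.List.bisectRight ps s := by
    intro m
    induction m with
    | zero =>
      intro j h1 h2
      rw [cwpAdvance, dif_neg (by omega)]
      omega
    | succ m ih =>
      intro j h1 h2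
      rw [cwpAdvance]
      by_cases hjl : j < ps.length
      · rw [dif_pos hjl]
        by_cases hv : ps.getD j 0 ≤ s
        · rw [if_pos hv]
          have hjb : j < PySem.List.bisectRight ps s := by
            by_contra hc
            push Not at hc
            have h3 := hgt j hjl hc
            rw [List.getD_eq_getElem ps 0 hjl] at hv
            omega
          exact ih (j + 1) (by omega) (by omega)
        · rw [if_neg hv]
          rcases Nat.lt_or_ge j (PySem.List.bisectRight ps s) with h | h
          · have h3 := hlt j hjl h
            rw [List.getD_eq_getElem ps 0 hjl] at hv
            omega
          · omega
      · rw [dif_neg hjl]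
        omega
  intro j hj
  exact key (ps.length - j) j le_rfl hj
lemma bisectRight_mono (ps : List Int) (hps : ps.Pairwise (· ≤ ·)) {s s' : Int} (h : s ≤ s') :
    PySem.List.bisectRight ps s ≤ PySem.List.bisectRight ps s' := by
  obtain ⟨hle, hlt, hgt⟩ := PySem.List.bisectRight_spec ps s hps
  obtain ⟨hle', hlt', hgt'⟩ := PySem.List.bisectRight_spec ps s' hps
  by_contra hc
  push Not at hc
  have hx : PySem.List.bisectRight ps s' < ps.length := by omega
  have h1 := hlt (PySem.List.bisectRight ps s') hx hc
  have h2 := hgt' (PySem.List.bisectRight ps s') hx le_rfl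
  omega
lemma bisect_ind_iff (ps : List Int) (hps : ps.Pairwise (· ≤ ·)) (s e : Int) :
    (PySem.List.bisectRight ps s < PySem.List.bisectLeft ps e) ↔
      (PySem.List.bisectRight ps s < ps.length ∧
        ps.getD (PySem.List.bisectRight ps s) 0 < e) := by
  obtain ⟨hleL, hltL, hgeL⟩ := PySem.List.bisectLeft_spec ps e hps
  constructor
  · intro h
    have hx : PySem.List.bisectRight ps s < ps.length := by omega
    refine ⟨hx, ?_⟩
    rw [List.getD_eq_getElem ps 0 hx]
    exact hltL _ hx h
  · rintro ⟨hx, hv⟩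
    rw [List.getD_eq_getElem ps 0 hx] at hv
    by_contra hc
    push Not at hc
    have := hgeL _ hx hc
    omega
lemma tp_fold_spec (ms ps : List Int) (hms : ms.Pairwise (· ≤ ·)) (hps : ps.Pairwise (· ≤ ·))
    (n : Nat) (hn : n + 1 ≤ ms.length) :
    (List.range n).foldl (fun (jc : Nat × Int) i =>
        let start := ms.getD i 0
        let stop := ms.getD (i + 1) 0
        let j := cwpAdvance ps start jc.1
        (j, if j < ps.length ∧ ps.getD j 0 < stop then jc.2 + 1 else jc.2)) (0, 0)
      = ((if n = 0 then 0 else PySem.List.bisectRight ps (ms.getD (n - 1) 0)),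
        ((List.range n).countP (fun i =>
          decide (PySem.List.bisectRight ps (ms.getD i 0) <
            PySem.List.bisectLeft ps (ms.getD (i + 1) 0))) : Int)) := by
  induction n with
  | zero => simp
  | succ n ih =>
    have hn' : n + 1 ≤ ms.length := by omega
    rw [List.range_succ, List.foldl_append, ih hn', List.countP_append]
    simp only [List.foldl_cons, List.foldl_nil]
    have hadv : cwpAdvance ps (ms.getD n 0)
        (if n = 0 then 0 else PySem.List.bisectRight ps (ms.getD (n - 1) 0))
        = PySem.List.bisectRight ps (ms.getD n 0) := by
      by_cases h0 : n = 0
      · rw [if_pos h0]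
        exact cwpAdvance_eq_bisectRight ps hps _ 0 (Nat.zero_le _)
      · rw [if_neg h0]
        refine cwpAdvance_eq_bisectRight ps hps _ _ ?_
        refine bisectRight_mono ps hps ?_
        have h1 : n - 1 < ms.length := by omega
        have h2 : n < ms.length := by omega
        rw [List.getD_eq_getElem ms 0 h1, List.getD_eq_getElem ms 0 h2]
        exact List.pairwise_iff_getElem.mp hms _ _ h1 h2 (by omega)
    simp only [hadv]
    refine Prod.ext_iff.mpr ⟨?_, ?_⟩
    · simp
    · rw [List.countP_singleton]
      by_cases hc : PySem.List.bisectRight ps (ms.getD n 0) <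
          PySem.List.bisectLeft ps (ms.getD (n + 1) 0)
      · rw [if_pos ((bisect_ind_iff ps hps _ _).mp hc), decide_eq_true hc, if_pos rfl]
        push_cast
        ring
      · rw [if_neg (fun h => hc ((bisect_ind_iff ps hps _ _).mpr h)),
          decide_eq_false hc]
        simp
lemma getD_innerA (l : List (String × List Int)) (d : PySem.Dict String Int) (s e : Int) (k : String) :
    (l.foldl (fun r kv =>
        if PySem.List.bisectRight (PySem.List.sorted kv.2 (fun x => x)) s <
            PySem.List.bisectLeft (PySem.List.sorted kv.2 (fun x => x)) e then
          r.modify kv.1 0 (· + 1) else r) d).getD k 0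
      = d.getD k 0 + (l.countP (fun kv => kv.1 == k &&
          decide (PySem.List.bisectRight (PySem.List.sorted kv.2 (fun x => x)) s <
            PySem.List.bisectLeft (PySem.List.sorted kv.2 (fun x => x)) e)) : Int) := by
  induction l generalizing d with
  | nil => simp
  | cons kv t ih =>
    rw [List.foldl_cons, List.countP_cons, ih]
    by_cases hb : PySem.List.bisectRight (PySem.List.sorted kv.2 (fun x => x)) s <
        PySem.List.bisectLeft (PySem.List.sorted kv.2 (fun x => x)) e
    · rw [if_pos hb, PySem.Dict.getD_modify]
      by_cases hk : k = kv.1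
      · rw [if_pos hk]
        simp [hk, hb]
        ring
      · rw [if_neg hk]
        have : (kv.1 == k) = false := by
          simp [Ne.symm hk]
        simp [this, hb]
    · rw [if_neg hb]
      have : decide (PySem.List.bisectRight (PySem.List.sorted kv.2 (fun x => x)) s <
          PySem.List.bisectLeft (PySem.List.sorted kv.2 (fun x => x)) e) = false :=
        decide_eq_false hb
      simp [this]
lemma getD_outerA (ms : List Int) (idxs : List Nat) (l : List (String × List Int))
    (d : PySem.Dict String Int) (k : String) :
    (idxs.foldl (fun r i =>
        l.foldl (fun r kv =>
          if PySem.List.bisectRight (PySem.List.sorted kv.2 (fun x => x)) (ms.getD i 0) <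
              PySem.List.bisectLeft (PySem.List.sorted kv.2 (fun x => x)) (ms.getD (i + 1) 0) then
            r.modify kv.1 0 (· + 1) else r) r) d).getD k 0
      = d.getD k 0 + (idxs.map (fun i => (l.countP (fun kv => kv.1 == k &&
          decide (PySem.List.bisectRight (PySem.List.sorted kv.2 (fun x => x)) (ms.getD i 0) <
            PySem.List.bisectLeft (PySem.List.sorted kv.2 (fun x => x)) (ms.getD (i + 1) 0))) : Int))).sum := by
  induction idxs generalizing d with
  | nil => simp
  | cons i t ih =>
    rw [List.foldl_cons, ih, getD_innerA, List.map_cons, List.sum_cons]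
    ring
lemma getD_foldB (l : List (String × List Int)) (g : String × List Int → Int)
    (d : PySem.Dict String Int) (k : String) :
    (l.foldl (fun r kv => r.modify kv.1 0 (· + g kv)) d).getD k 0
      = d.getD k 0 + ((l.filter (fun kv => kv.1 == k)).map g).sum := by
  induction l generalizing d with
  | nil => simp
  | cons kv t ih =>
    rw [List.foldl_cons, ih, PySem.Dict.getD_modify]
    by_cases hk : k = kv.1
    · rw [if_pos hk]
      have : (kv.1 == k) = true := by simp [hk]
      rw [List.filter_cons, if_pos this, List.map_cons, List.sum_cons, hk]
      ring
    · rw [if_neg hk]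
      have : (kv.1 == k) = false := by simp [Ne.symm hk]
      rw [List.filter_cons, if_neg (by simp [this])]
lemma keys_innerA (l : List (String × List Int)) (d : PySem.Dict String Int) (s e : Int)
    (h : ∀ kv ∈ l, d.contains kv.1 = true) :
    (l.foldl (fun r kv =>
        if PySem.List.bisectRight (PySem.List.sorted kv.2 (fun x => x)) s <
            PySem.List.bisectLeft (PySem.List.sorted kv.2 (fun x => x)) e then
          r.modify kv.1 0 (· + 1) else r) d).keys = d.keys := by
  induction l generalizing d with
  | nil => simp
  | cons kv t ih =>
    rw [List.foldl_cons]
    by_cases hb : PySem.List.bisectRight (PySem.List.sorted kv.2 (fun x => x)) s <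
        PySem.List.bisectLeft (PySem.List.sorted kv.2 (fun x => x)) e
    · rw [if_pos hb]
      have hkeys : (d.modify kv.1 0 (· + 1)).keys = d.keys := by
        rw [PySem.Dict.keys_modify, PySem.Dict.keys_insert_of_contains _ _ (h kv (by simp))]
      rw [ih _ ?_, hkeys]
      intro kv' hkv'
      rw [PySem.Dict.contains_modify]
      simp [h kv' (by simp [hkv'])]
    · rw [if_neg hb]
      exact ih d (fun kv' hkv' => h kv' (by simp [hkv']))
lemma keys_outerA (ms : List Int) (idxs : List Nat) (l : List (String × List Int))
    (d : PySem.Dict String Int) (h : ∀ kv ∈ l, d.contains kv.1 = true) :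
    (idxs.foldl (fun r i =>
        l.foldl (fun r kv =>
          if PySem.List.bisectRight (PySem.List.sorted kv.2 (fun x => x)) (ms.getD i 0) <
              PySem.List.bisectLeft (PySem.List.sorted kv.2 (fun x => x)) (ms.getD (i + 1) 0) then
            r.modify kv.1 0 (· + 1) else r) r) d).keys = d.keys := by
  induction idxs generalizing d with
  | nil => simp
  | cons i t ih =>
    rw [List.foldl_cons]
    have hk := keys_innerA l d (ms.getD i 0) (ms.getD (i + 1) 0) h
    rw [ih _ ?_, hk]
    intro kv' hkv'
    rw [PySem.Dict.contains_iff_mem_keys, hk, ← PySem.Dict.contains_iff_mem_keys]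
    exact h kv' hkv'
lemma keys_foldB (l : List (String × List Int)) (g : String × List Int → Int)
    (d : PySem.Dict String Int) (h : ∀ kv ∈ l, d.contains kv.1 = true) :
    (l.foldl (fun r kv => r.modify kv.1 0 (· + g kv)) d).keys = d.keys := by
  induction l generalizing d with
  | nil => simp
  | cons kv t ih =>
    rw [List.foldl_cons]
    have hkeys : (d.modify kv.1 0 (· + g kv)).keys = d.keys := by
      rw [PySem.Dict.keys_modify, PySem.Dict.keys_insert_of_contains _ _ (h kv (by simp))]
    rw [ih _ ?_, hkeys]
    intro kv' hkv'
    rw [PySem.Dict.contains_modify]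
    simp [h kv' (by simp [hkv'])]
lemma contains_fold_insert_mono (l : List (String × List Int)) (d : PySem.Dict String Int)
    (k : String) (h : d.contains k = true) :
    (l.foldl (fun (d : PySem.Dict String Int) kv => d.insert kv.1 0) d).contains k = true := by
  induction l generalizing d with
  | nil => simpa
  | cons kv t ih =>
    rw [List.foldl_cons]
    refine ih _ ?_
    rw [PySem.Dict.contains_insert]
    simp [h]

lemma contains_fromkeys (l : List (String × List Int)) :
    ∀ kv ∈ l, (l.foldl (fun (d : PySem.Dict String Int) kv => d.insert kv.1 0)
      PySem.Dict.empty).contains kv.1 = true := by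
  have gen : ∀ (l : List (String × List Int)) (d : PySem.Dict String Int), ∀ kv ∈ l,
      (l.foldl (fun (d : PySem.Dict String Int) kv => d.insert kv.1 0) d).contains kv.1 = true := by
    intro l
    induction l with
    | nil => simp
    | cons kv t ih =>
      intro d kv' hkv'
      rw [List.foldl_cons]
      rcases List.mem_cons.mp hkv' with h | h
      · subst h
        exact contains_fold_insert_mono t _ _ (PySem.Dict.contains_insert_self d kv'.1 0)
      · exact ih _ kv' h
  exact gen l PySem.Dict.empty
lemma sum_countP_swap {α β : Type} (r : List β) (l : List α) (P : β → α → Bool) :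
    (r.map (fun i => (l.countP (P i) : Int))).sum
      = (l.map (fun x => (r.countP (fun i => P i x) : Int))).sum := by
  induction l with
  | nil => simp
  | cons x t ih =>
    have step : (r.map (fun i => (t.countP (P i) + if P i x then 1 else 0 : Int))).sum
        = (r.map (fun i => (t.countP (P i) : Int))).sum
          + (r.map (fun i => (if P i x then 1 else 0 : Int))).sum :=
      PySem.List.sum_map_add_int r _ _
    calc (r.map (fun i => (List.countP (P i) (x :: t) : Int))).sum
        = (r.map (fun i => (t.countP (P i) + if P i x then 1 else 0 : Int))).sum := by
          congr 1
          refine List.map_congr_left (fun i _ => ?_)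
          rw [List.countP_cons]
          push_cast
          split_ifs <;> simp
      _ = (r.map (fun i => (t.countP (P i) : Int))).sum
          + (r.map (fun i => (if P i x then 1 else 0 : Int))).sum := step
      _ = ((x :: t).map (fun y => (r.countP (fun i => P i y) : Int))).sum := by
          rw [ih, PySem.List.sum_map_ite_one_zero (fun i => P i x) r]
          simp [add_comm]
-- ===== VERDICT (by name: the statement is the Claim_ definition above) =====
theorem count_intervals_with_pattern_spec : Claim_equal_count_intervals_with_pattern := by
  intro main pd _
  unfold Spec_count_intervals_with_pattern count_intervals_with_pattern
    count_intervals_with_pattern_alt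
  dsimp only
  have hmsp : (PySem.List.sorted main (fun x => x)).Pairwise (· ≤ ·) :=
    PySem.List.sorted_pairwise main (fun x => x)
  set ms := PySem.List.sorted main (fun x => x) with hms
  set d0 := pd.foldl (fun (d : PySem.Dict String Int) kv => d.insert kv.1 0)
    PySem.Dict.empty with hd0
  have hcont : ∀ kv ∈ pd, d0.contains kv.1 = true := contains_fromkeys pd
  have hnd : d0.keys.Nodup :=
    PySem.Dict.nodup_keys_foldl_insert_key pd Prod.fst (fun _ _ => 0) PySem.Dict.empty
      (by simp)
  by_cases h2 : 2 ≤ ms.length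
  · rw [if_pos h2]
    set gB : String × List Int → Int := fun kv =>
      ((List.range (ms.length - 1)).foldl (fun (jc : Nat × Int) i =>
        (cwpAdvance (PySem.List.sorted kv.2 (fun x => x)) (ms.getD i 0) jc.1,
          if cwpAdvance (PySem.List.sorted kv.2 (fun x => x)) (ms.getD i 0) jc.1 <
                (PySem.List.sorted kv.2 (fun x => x)).length ∧
              (PySem.List.sorted kv.2 (fun x => x)).getD
                (cwpAdvance (PySem.List.sorted kv.2 (fun x => x)) (ms.getD i 0) jc.1) 0 <
                ms.getD (i + 1) 0 then
            jc.2 + 1 else jc.2)) (0, 0)).2 with hgB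
    have hkA := keys_outerA ms (List.range (ms.length - 1)) pd d0 hcont
    have hkB := keys_foldB pd gB d0 hcont
    rw [PySem.Dict.items_eq_map_keys _ (by rw [hkA]; exact hnd) 0,
        PySem.Dict.items_eq_map_keys _ (by rw [hkB]; exact hnd) 0, hkA, hkB]
    refine List.map_congr_left (fun k _ => ?_)
    refine Prod.ext_iff.mpr ⟨rfl, ?_⟩
    rw [getD_outerA ms (List.range (ms.length - 1)) pd d0 k, getD_foldB pd gB d0 k]
    congr 1
    have hn : (ms.length - 1) + 1 ≤ ms.length := by omega
    have hBmap : ((pd.filter (fun kv => kv.1 == k)).map gB)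
        = (pd.filter (fun kv => kv.1 == k)).map (fun kv =>
            ((List.range (ms.length - 1)).countP (fun i =>
              decide (PySem.List.bisectRight (PySem.List.sorted kv.2 (fun x => x)) (ms.getD i 0) <
                PySem.List.bisectLeft (PySem.List.sorted kv.2 (fun x => x)) (ms.getD (i + 1) 0))) : Int)) := by
      refine List.map_congr_left (fun kv _ => ?_)
      have ht := tp_fold_spec ms (PySem.List.sorted kv.2 (fun x => x)) hmsp
        (PySem.List.sorted_pairwise kv.2 (fun x => x)) (ms.length - 1) hn
      rw [hgB]
      simpa using congrArg Prod.snd ht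
    rw [hBmap]
    have hAmap : ((List.range (ms.length - 1)).map (fun i => (pd.countP (fun kv => kv.1 == k &&
          decide (PySem.List.bisectRight (PySem.List.sorted kv.2 (fun x => x)) (ms.getD i 0) <
            PySem.List.bisectLeft (PySem.List.sorted kv.2 (fun x => x)) (ms.getD (i + 1) 0))) : Int)))
        = ((List.range (ms.length - 1)).map (fun i =>
            (((pd.filter (fun kv => kv.1 == k)).countP (fun kv =>
              decide (PySem.List.bisectRight (PySem.List.sorted kv.2 (fun x => x)) (ms.getD i 0) <
                PySem.List.bisectLeft (PySem.List.sorted kv.2 (fun x => x)) (ms.getD (i + 1) 0)))) : Int))) := by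
      refine List.map_congr_left (fun i _ => ?_)
      rw [List.countP_filter]
      congr 1
      exact List.countP_congr (fun kv _ => by rw [Bool.and_comm])
    rw [hAmap]
    rw [sum_countP_swap (List.range (ms.length - 1)) (pd.filter (fun kv => kv.1 == k))
      (fun i kv =>
        decide (PySem.List.bisectRight (PySem.List.sorted kv.2 (fun x => x)) (ms.getD i 0) <
          PySem.List.bisectLeft (PySem.List.sorted kv.2 (fun x => x)) (ms.getD (i + 1) 0)))]
  · rw [if_neg h2]
    have h0 : ms.length - 1 = 0 := by omega
    rw [h0, List.range_zero, List.foldl_nil]
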